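-- pv_equiv track=rewrite | github.com/artemponomarevjetski/python-codility-solutions | manhattan-skyline.py | solution
-- ===== SOURCE A (Python) =====
-- def solution(H):
--     # write your code in Python 3.6
--     """
--     Task description is given on Codility website, https://app.codility.com/programmers/
--     Manhattan skyline
--     """
--     N = len(H)
--     if N == 0:
--         return 0
--     if not (N >= 1 and N <= 1e5):
--         return 0
--     if not (min(H) >= 1 and max(H) <= 1e9):
--         return 0
--     for h in H:
--         if h <= 0:
--             return 0
--
--     accepted_blocks = []
--     new_blocks = []
--     for i in range(N):
--         if i == 0:
--             new_blocks.append(H[i])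
--         elif H[i] > H[i-1]:
--             new_blocks.append(H[i]-H[i-1])
--         else:
--             height_drop = H[i-1]-H[i]
--             if height_drop:
--                 sum_height_top_blocks = 0
--                 while new_blocks and sum_height_top_blocks < height_drop:
--                     block_out = new_blocks.pop()
--                     sum_height_top_blocks += block_out
--                     accepted_blocks.append(block_out)
--                 if sum_height_top_blocks > height_drop:
--                     new_blocks.append(sum_height_top_blocks-height_drop)
--
--     return len(accepted_blocks+new_blocks)
-- ===== SOURCE B (Python) =====
-- def solution(H):
--     N = len(H)
--     if N == 0:
--         return 0
--     if not (N >= 1 and N <= 1e5):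
--         return 0
--     if not (min(H) >= 1 and max(H) <= 1e9):
--         return 0
--     for h in H:
--         if h <= 0:
--             return 0
--
--     stack = []
--     count = 0
--     for h in H:
--         while stack and stack[-1] > h:
--             stack.pop()
--         if not stack or stack[-1] < h:
--             stack.append(h)
--             count += 1
--     return count
-- ===== Notes on version B (the rewrite author's own statement) =====
-- stated objective: simpler
-- what changed: B replaces A's bookkeeping of height increments (a new_blocks list of deltas plus an accepted_blocks list whose concatenated length is returned) with the canonical monotonic stack of absolute heights and a single running counter of pushes; A's four validation guards are kept verbatim.
import Mathlib
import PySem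

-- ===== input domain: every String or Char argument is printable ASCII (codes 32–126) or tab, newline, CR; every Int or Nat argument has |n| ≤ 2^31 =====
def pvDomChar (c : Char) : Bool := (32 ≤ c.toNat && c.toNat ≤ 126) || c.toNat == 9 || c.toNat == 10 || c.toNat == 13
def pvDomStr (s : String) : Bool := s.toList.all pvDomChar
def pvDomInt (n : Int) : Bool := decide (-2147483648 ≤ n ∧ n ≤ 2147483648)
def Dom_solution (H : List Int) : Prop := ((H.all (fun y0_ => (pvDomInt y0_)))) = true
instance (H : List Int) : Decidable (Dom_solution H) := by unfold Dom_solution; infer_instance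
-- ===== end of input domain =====

-- ===== PORT A =====
-- B changes A's two-list increment bookkeeping into a monotonic stack of absolute
-- heights with a push counter (objective: simpler); same O(n) cost.
-- Stacks are Lean lists with the top at the HEAD (python append/pop at the end).

-- the inner while loop: pop increments from new_blocks into accepted while sum < drop
def popA (nb acc : List Int) (s drop : Int) : List Int × List Int × Int :=
  match nb with
  | [] => ([], acc, s)
  | b :: rest => if s < drop then popA rest (b :: acc) (s + b) drop else (b :: rest, acc, s)

-- the main for loop of A, iterating over H[1:] with prev = H[i-1]
def loopA (prev : Int) (rest nb acc : List Int) : List Int × List Int :=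
  match rest with
  | [] => (nb, acc)
  | h :: t =>
    if h > prev then loopA h t ((h - prev) :: nb) acc
    else
      let drop := prev - h
      if drop ≠ 0 then
        let r := popA nb acc 0 drop
        let nb' := if r.2.2 > drop then (r.2.2 - drop) :: r.1 else r.1
        loopA h t nb' r.2.1
      else loopA h t nb acc

def solution (H : List Int) : Int :=
  if (H.length : Int) == 0 then 0
  else if !((H.length : Int) ≥ 1 && (H.length : Int) ≤ 100000) then 0
  else if !(((PySem.List.min? H (fun x => x)).getD 0 ≥ 1) && ((PySem.List.max? H (fun x => x)).getD 0 ≤ 1000000000)) then 0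
  else if H.any (fun h => h ≤ 0) then 0
  else
    match H with
    | [] => 0
    | h0 :: rest =>
      let r := loopA h0 rest [h0] []
      ((r.2 ++ r.1).length : Int)

-- ===== PORT B =====
-- pop heights strictly above h
def popB (st : List Int) (h : Int) : List Int :=
  match st with
  | [] => []
  | x :: r => if x > h then popB r h else x :: r

def loopB (hs st : List Int) (c : Int) : Int :=
  match hs with
  | [] => c
  | h :: t =>
    match popB st h with
    | [] => loopB t [h] (c + 1)
    | x :: st' => if x < h then loopB t (h :: x :: st') (c + 1) else loopB t (x :: st') c

def solution_alt (H : List Int) : Int :=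
  if (H.length : Int) == 0 then 0
  else if !((H.length : Int) ≥ 1 && (H.length : Int) ≤ 100000) then 0
  else if !(((PySem.List.min? H (fun x => x)).getD 0 ≥ 1) && ((PySem.List.max? H (fun x => x)).getD 0 ≤ 1000000000)) then 0
  else if H.any (fun h => h ≤ 0) then 0
  else loopB H [] 0

-- ===== PRECONDITION & SPEC =====
def Spec_solution (H : List Int) (out : Int) : Prop := out = solution_alt H
instance (H : List Int) (out : Int) : Decidable (Spec_solution H out) := by unfold Spec_solution; infer_instance

-- ===== CLAIM (what is proved, stated in full; the proofs are below) =====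
def Claim_equal_solution : Prop := ∀ (H : List Int), Dom_solution H → Spec_solution H (solution H)

-- ===== LEMMAS AND PROOFS =====

-- absolute heights of the increment stack nb when the current total height is cur
def heights (nb : List Int) (cur : Int) : List Int :=
  match nb with
  | [] => []
  | d :: r => cur :: heights r (cur - d)

-- popB on the heights picture is exactly popA
lemma pop_corr (nb : List Int) (acc : List Int) (s prev drop : Int) :
    popB (heights nb (prev - s)) (prev - drop) = heights (popA nb acc s drop).1 (prev - (popA nb acc s drop).2.2)
    ∧ (popA nb acc s drop).2.1.length + (popA nb acc s drop).1.length = acc.length + nb.length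
    ∧ (popA nb acc s drop).2.2 + (popA nb acc s drop).1.sum = s + nb.sum
    ∧ (drop ≤ (popA nb acc s drop).2.2 ∨ (popA nb acc s drop).1 = []) := by
  induction nb generalizing acc s with
  | nil =>
    refine ⟨rfl, rfl, by simp [popA], Or.inr rfl⟩
  | cons d r ih =>
    by_cases hlt : s < drop
    · have e1 : popA (d :: r) acc s drop = popA r (d :: acc) (s + d) drop := by
        simp [popA, hlt]
      rw [e1]
      obtain ⟨h1, h2, h3, h4⟩ := ih (d :: acc) (s + d)
      refine ⟨?_, ?_, ?_, h4⟩
      · have e2 : popB (heights (d :: r) (prev - s)) (prev - drop)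
            = popB (heights r (prev - (s + d))) (prev - drop) := by
          simp [heights, popB, show prev - s > prev - drop from by omega,
            show prev - s - d = prev - (s + d) from by ring]
        rw [e2, h1]
      · simp only [List.length_cons] at h2 ⊢; omega
      · simp only [List.sum_cons] at h3 ⊢; omega
    · have e1 : popA (d :: r) acc s drop = (d :: r, acc, s) := by simp [popA, hlt]
      rw [e1]
      refine ⟨?_, rfl, rfl, Or.inl (by show drop ≤ s; omega)⟩
      simp [heights, popB, show ¬ (prev - s > prev - drop) from by omega]

lemma loop_corr (rest : List Int) (nb acc : List Int) (cur c : Int)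
    (hsum : nb.sum = cur) (hc : c = (acc.length : Int) + nb.length)
    (hpos : ∀ h ∈ rest, 1 ≤ h) :
    loopB rest (heights nb cur) c
      = (((loopA cur rest nb acc).2.length : Int) + ((loopA cur rest nb acc).1.length : Int)) := by
  induction rest generalizing nb acc cur c with
  | nil => simp [loopA, loopB]; omega
  | cons h t ih =>
    have hh : (1 : Int) ≤ h := hpos h (by simp)
    have hpt : ∀ x ∈ t, (1 : Int) ≤ x := fun x hx => hpos x (by simp [hx])
    by_cases hgt : h > cur
    · -- rising step: both push
      have eA : loopA cur (h :: t) nb acc = loopA h t ((h - cur) :: nb) acc := by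
        simp [loopA, hgt]
      have eB : loopB (h :: t) (heights nb cur) c
          = loopB t (heights ((h - cur) :: nb) h) (c + 1) := by
        cases nb with
        | nil =>
          have hcur0 : cur = 0 := by simpa using hsum.symm
          subst hcur0
          simp [heights, loopB, popB]
        | cons d rr =>
          simp [heights, loopB, popB, show ¬ (cur > h) from by omega, hgt,
            show h - (h - cur) = cur from by ring]
      rw [eA, eB]
      exact ih ((h - cur) :: nb) acc h (c + 1)
        (by simp [List.sum_cons]; omega) (by simp [List.length_cons]; omega) hpt
    · by_cases hdrop : cur - h = 0
      · -- equal heights: both do nothing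
        have hcureq : cur = h := by omega
        subst hcureq
        have eA : loopA cur (cur :: t) nb acc = loopA cur t nb acc := by
          simp [loopA]
        cases nb with
        | nil => exfalso; simp at hsum; omega
        | cons d rr =>
          have eB : loopB (cur :: t) (heights (d :: rr) cur) c = loopB t (heights (d :: rr) cur) c := by
            show loopB (cur :: t) (cur :: heights rr (cur - d)) c = _
            simp [loopB, popB]
            rfl
          rw [eA, eB]
          exact ih (d :: rr) acc cur c hsum hc hpt
      · -- genuine drop: A pops increments, B pops heights
        obtain ⟨p1, p2, p3, p4⟩ := pop_corr nb acc 0 cur (cur - h)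
        set r := popA nb acc 0 (cur - h) with hr
        have hpb : popB (heights nb cur) h = heights r.1 (cur - r.2.2) := by
          have := p1
          rw [show cur - (cur - h) = h from by ring, show cur - (0:Int) = cur from by ring] at this
          exact this
        have hsum' : r.2.2 + r.1.sum = cur := by simpa [hsum] using p3
        have eA : loopA cur (h :: t) nb acc
            = loopA h t (if r.2.2 > cur - h then (r.2.2 - (cur - h)) :: r.1 else r.1) r.2.1 := by
          simp [loopA, hgt, hdrop, ← hr]
        rw [eA]
        cases hr1 : r.1 with
        | nil =>
          have hs2 : r.2.2 = cur := by simp [hr1] at hsum'; omega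
          have hbig : r.2.2 > cur - h := by omega
          have eB : loopB (h :: t) (heights nb cur) c = loopB t (heights [h] h) (c + 1) := by
            simp [loopB, hpb, hr1, heights]
          rw [eB, if_pos hbig, show r.2.2 - (cur - h) = h from by omega]
          refine ih [h] r.2.1 h (c + 1) (by simp) ?_ hpt
          have := p2; rw [hr1] at this; simp at this; simp [this]; omega
        | cons x rr =>
          rw [← hr1]
          have hdle : cur - h ≤ r.2.2 := by
            rcases p4 with hle | hnil
            · exact hle
            · rw [hnil] at hr1; cases hr1
          by_cases hbig : r.2.2 > cur - h
          · -- strict remainder: both push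
            have eB : loopB (h :: t) (heights nb cur) c
                = loopB t (heights ((r.2.2 - (cur - h)) :: r.1) h) (c + 1) := by
              rw [show heights ((r.2.2 - (cur - h)) :: r.1) h
                  = h :: heights r.1 (cur - r.2.2) from by
                simp [heights, show h - (r.2.2 - (cur - h)) = cur - r.2.2 from by ring]]
              simp [loopB, hpb, hr1, heights, show cur - r.2.2 < h from by omega]
            rw [eB, if_pos hbig]
            refine ih ((r.2.2 - (cur - h)) :: r.1) r.2.1 h (c + 1)
              (by simp only [List.sum_cons]; omega) ?_ hpt
            have := p2; simp only [List.length_cons] at this ⊢; omega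
          · -- exact match: neither pushes
            have hs2 : r.2.2 = cur - h := by omega
            have eB : loopB (h :: t) (heights nb cur) c = loopB t (heights r.1 h) c := by
              have hx : cur - r.2.2 = h := by omega
              rw [show heights r.1 h = heights r.1 (cur - r.2.2) from by rw [hx]]
              simp [loopB, hpb, hr1, heights, hx]
            rw [eB, if_neg hbig]
            refine ih r.1 r.2.1 h c (by omega) ?_ hpt
            have := p2; omega

-- ===== VERDICT (by name: the statement is the Claim_ definition above) =====
theorem solution_spec : Claim_equal_solution := by
  unfold Claim_equal_solution Spec_solution
  intro H _
  cases H with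
  | nil => rfl
  | cons h0 rest =>
    show solution (h0 :: rest) = solution_alt (h0 :: rest)
    unfold solution solution_alt
    split_ifs with g1 g2 g3 g4
    · rfl
    · rfl
    · rfl
    · rfl
    · have hpos : ∀ x ∈ h0 :: rest, (1:Int) ≤ x := by
        intro x hx
        by_contra hcon
        exact g4 (by simp only [List.any_eq_true]; exact ⟨x, hx, by simp; omega⟩)
      have e0 : loopB (h0 :: rest) [] 0 = loopB rest (heights [h0] h0) 1 := by
        simp [loopB, popB, heights]
      have hmain := loop_corr rest [h0] [] h0 1 (by simp) (by simp)
        (fun x hx => hpos x (by simp [hx]))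
      rw [e0, hmain]
      simp [List.length_append]
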